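-- pv_equiv track=rewrite | github.com/etheleon/vessel-scoring | scripts/create_fishing_nonfishing_ranges.py | dedup_and_sort_points
-- ===== SOURCE A (Python) =====
-- def dedup_and_sort_points(points):
--     points.sort()
--     dedupped = []
--     last_key = (None, None)
--     last_fishing = None
--     for mmsi, timestamp, is_fishing in points:
--         key = (mmsi, timestamp)
--         is_fishing = None if is_fishing in (-1, 2) else is_fishing
--         if key == last_key:
--             if is_fishing != last_fishing:
--                 dedupped[-1] = (mmsi, timestamp, None)
--         else:
--             dedupped.append((mmsi, timestamp, is_fishing))
--             last_key = key
--             last_fishing = is_fishing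
--
--     return dedupped
-- ===== SOURCE B (Python) =====
-- def dedup_and_sort_points(points):
--     # Hash aggregation instead of sort-then-scan: one dict pass over the
--     # (unsorted) points merges each key's normalized flags -- the merge
--     # (keep the flag while all agree, None on the first disagreement) is
--     # order-independent -- then only the distinct keys are sorted.
--     # Note: unlike A, B does not sort `points` in place.
--     merged = {}
--     for mmsi, timestamp, f in points:
--         f = None if f in (-1, 2) else f
--         key = (mmsi, timestamp)
--         if key not in merged:
--             merged[key] = f
--         elif merged[key] != f:
--             merged[key] = None
--     return [(mmsi, timestamp, f) for (mmsi, timestamp), f in sorted(merged.items())]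
-- ===== Notes on version B (the rewrite author's own statement) =====
-- stated objective: alternative
-- what changed: B replaces A's sort-the-whole-list-then-linear-scan-with-last_key/last_fishing-state by hash aggregation: one dict pass over the unsorted points merges each key's normalized flags (kept while they all agree, None on the first disagreement -- an order-independent merge), and only the distinct keys are then sorted; B also does not sort `points` in place, the equivalence is about the return value.
import Mathlib
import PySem

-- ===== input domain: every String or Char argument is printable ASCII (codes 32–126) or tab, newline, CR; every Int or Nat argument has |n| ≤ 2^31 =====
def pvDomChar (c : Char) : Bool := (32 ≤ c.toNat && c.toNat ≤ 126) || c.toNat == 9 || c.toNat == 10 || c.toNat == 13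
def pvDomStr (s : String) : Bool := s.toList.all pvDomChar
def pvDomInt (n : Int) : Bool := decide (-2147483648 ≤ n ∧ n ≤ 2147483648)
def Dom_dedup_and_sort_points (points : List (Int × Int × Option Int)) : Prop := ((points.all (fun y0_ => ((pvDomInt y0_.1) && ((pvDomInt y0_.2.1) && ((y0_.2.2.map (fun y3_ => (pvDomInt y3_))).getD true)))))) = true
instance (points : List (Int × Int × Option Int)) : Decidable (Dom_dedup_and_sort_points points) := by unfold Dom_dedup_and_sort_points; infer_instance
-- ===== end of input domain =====

-- B replaces A's sort-then-scan (last_key/last_fishing state, dedupped[-1] overwrite) by hash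
-- aggregation: one dict pass over the unsorted points merges each key's normalized flags
-- (order-independent merge), then only the distinct items are sorted (objective: alternative).
-- A sorts `points` IN PLACE; B does not mutate `points` — the equivalence proved is about the
-- return value only.


-- ===== PORT A =====
-- `is_fishing = None if is_fishing in (-1, 2) else is_fishing`
def pvNorm (f : Option Int) : Option Int :=
  if f = some (-1) ∨ f = some 2 then none else f

-- Python sorts the tuples lexicographically. On inputs in Dom_ ∩ Pre_ (|ints| ≤ 2^31; two
-- elements share (mmsi, timestamp) only when their flags are both None or both ints, since
-- Python's sort raises TypeError otherwise) this integer key induces exactly Python's order: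
-- mmsi, then timestamp, then the int flag (None flags are only ever compared to equal keys'
-- None flags, where both orders tie and stability applies identically).
def pvSortKey (p : Int × Int × Option Int) : Int :=
  (p.1 * 2 ^ 33 + p.2.1) * 2 ^ 34 + (match p.2.2 with | none => 0 | some v => v)

-- the for-loop; `dedupped` is kept reversed (append = cons, dedupped[-1] = head)
def pvLoopA : List (Int × Int × Option Int) → List (Int × Int × Option Int) →
    Option ((Int × Int) × Option Int) → List (Int × Int × Option Int)
  | [], acc, _ => acc.reverse
  | (m, t, f) :: rest, acc, last =>
      let fi := pvNorm f
      match last with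
      | some (k, lf) =>
          if (m, t) = k then
            if fi ≠ lf then pvLoopA rest ((m, t, none) :: acc.tail) (some (k, lf))
            else pvLoopA rest acc (some (k, lf))
          else pvLoopA rest ((m, t, fi) :: acc) (some ((m, t), fi))
      | none => pvLoopA rest ((m, t, fi) :: acc) (some ((m, t), fi))

def dedup_and_sort_points (points : List (Int × Int × Option Int)) : List (Int × Int × Option Int) :=
  pvLoopA (PySem.List.sorted points pvSortKey) [] none

-- ===== PORT B =====
-- one iteration of B's dict-merging loop:
-- `if key not in merged: merged[key] = f  elif merged[key] != f: merged[key] = None`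
def pvStepB (d : PySem.Dict (Int × Int) (Option Int)) (p : Int × Int × Option Int) :
    PySem.Dict (Int × Int) (Option Int) :=
  let fi := pvNorm p.2.2
  let key := (p.1, p.2.1)
  match d.get? key with
  | none => d.insert key fi
  | some old => if old ≠ fi then d.insert key none else d

-- `sorted(merged.items())` compares pairs ((mmsi, timestamp), flag) lexicographically; the
-- dict's keys are distinct, so the flag is never actually compared, and on Dom's bounded ints
-- this integer key realizes exactly that order.
def pvSortKeyB (q : (Int × Int) × Option Int) : Int :=
  (q.1.1 * 2 ^ 33 + q.1.2) * 2 ^ 34 + (match q.2 with | none => 0 | some v => v)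

def dedup_and_sort_points_alt (points : List (Int × Int × Option Int)) : List (Int × Int × Option Int) :=
  let merged := points.foldl pvStepB PySem.Dict.empty
  (PySem.List.sorted merged.items pvSortKeyB).map (fun q => (q.1.1, q.1.2, q.2))

-- ===== PRECONDITION & SPEC =====
-- Pre_ excludes exactly the inputs on which A's points.sort() raises TypeError: two elements
-- with the same (mmsi, timestamp) whose flags are None and an int (uncomparable in Python 3).
def Pre_dedup_and_sort_points (points : List (Int × Int × Option Int)) : Prop :=
  ∀ p ∈ points, ∀ q ∈ points, p.1 = q.1 → p.2.1 = q.2.1 → p.2.2.isNone = q.2.2.isNone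

instance (points : List (Int × Int × Option Int)) : Decidable (Pre_dedup_and_sort_points points) := by
  unfold Pre_dedup_and_sort_points; infer_instance

def pvWitness_dedup_and_sort_points : (List (Int × Int × Option Int)) :=
  [(2, 1, none), (1, 1, some 2), (1, 1, some 2), (1, 2, some 0)]

def Spec_dedup_and_sort_points (points : List (Int × Int × Option Int)) (out : List (Int × Int × Option Int)) : Prop := out = dedup_and_sort_points_alt points
instance (points : List (Int × Int × Option Int)) (out : List (Int × Int × Option Int)) : Decidable (Spec_dedup_and_sort_points points out) := by unfold Spec_dedup_and_sort_points; infer_instance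

-- ===== CLAIM (what is proved, stated in full; the proofs are below) =====
def Claim_equal_dedup_and_sort_points : Prop := ∀ (points : List (Int × Int × Option Int)), Dom_dedup_and_sort_points points → Pre_dedup_and_sort_points points → Spec_dedup_and_sort_points points (dedup_and_sort_points points)

-- ===== LEMMAS AND PROOFS =====

-- ---- proof-side vocabulary ----
def pvKeyOf (p : Int × Int × Option Int) : Int × Int := (p.1, p.2.1)

def pvKle (a b : Int × Int) : Prop := a.1 < b.1 ∨ (a.1 = b.1 ∧ a.2 ≤ b.2)
def pvKlt (a b : Int × Int) : Prop := a.1 < b.1 ∨ (a.1 = b.1 ∧ a.2 < b.2)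

-- normalized flags of the entries of l with key k
def pvFlagsAt (k : Int × Int) (l : List (Int × Int × Option Int)) : List (Option Int) :=
  (l.filter (fun p => decide (pvKeyOf p = k))).map (fun p => pvNorm p.2.2)

-- the merge B's dict performs on one key's flags, and its closed form
def pvComb (v f : Option Int) : Option Int := if v ≠ f then none else v

def pvMeet0 : List (Option Int) → Option Int
  | [] => none
  | f :: fs => if fs.all (· == f) then f else none

-- grouping of a sorted list into runs of equal keys (A's loop processes exactly these runs)
def pvSameKey (p q : Int × Int × Option Int) : Bool :=
  decide (q.1 = p.1 ∧ q.2.1 = p.2.1)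

def pvGroups : List (Int × Int × Option Int) → List (List (Int × Int × Option Int))
  | [] => []
  | p :: ps =>
      (p :: ps.takeWhile (pvSameKey p)) :: pvGroups (ps.dropWhile (pvSameKey p))
termination_by l => l.length
decreasing_by
  exact Nat.lt_succ_of_le (List.length_dropWhile_le _ _)

def pvGroupOut (g : List (Int × Int × Option Int)) : Int × Int × Option Int :=
  match g with
  | [] => (0, 0, none)  -- unreachable: pvGroups produces nonempty groups
  | (m, t, _) :: _ =>
      let flags : PySem.Set (Option Int) := PySem.Set.ofList (g.map (fun p => pvNorm p.2.2))
      (m, t, match flags with | [f] => f | _ => none)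

-- boundedness (from Dom_) needed to decode/encode the integer sort keys
def pvBnd (p : Int × Int × Option Int) : Prop :=
  (-2147483648 ≤ p.1 ∧ p.1 ≤ 2147483648) ∧ (-2147483648 ≤ p.2.1 ∧ p.2.1 ≤ 2147483648) ∧
    (∀ v, p.2.2 = some v → -2147483648 ≤ v ∧ v ≤ 2147483648)

-- ---- A-side: the loop computes the per-group outputs (unchanged from the loop's shape) ----

theorem pvSet_single (a : Option Int) (ys : List (Option Int)) :
    (match (PySem.Set.ofList (a :: ys) : PySem.Set (Option Int)) with
      | [f] => f | _ => none) = if ys.all (· == a) then a else none := by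
  split_ifs with hall
  · have h1 : (PySem.Set.ofList (a :: ys) : PySem.Set (Option Int)) = [a] := by
      rw [PySem.Set.ofList_eq_foldl]
      simp only [List.foldl_cons]
      have hbase : PySem.Set.add ([] : PySem.Set (Option Int)) a = [a] := rfl
      rw [hbase]
      clear hbase
      induction ys with
      | nil => rfl
      | cons y ys ih =>
        simp only [List.all_cons, Bool.and_eq_true, beq_iff_eq] at hall
        obtain ⟨rfl, h2⟩ := hall
        simp only [List.foldl_cons]
        have h3 : PySem.Set.add [y] y = [y] := by simp [PySem.Set.add, PySem.Set.contains]
        rw [h3]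
        exact ih h2
    rw [h1]
  · simp only [List.all_eq_true, beq_iff_eq, not_forall] at hall
    obtain ⟨y, hy, hne⟩ := hall
    have ha : a ∈ (PySem.Set.ofList (a :: ys) : PySem.Set (Option Int)) := by
      rw [PySem.Set.mem_ofList]; simp
    have hyS : y ∈ (PySem.Set.ofList (a :: ys) : PySem.Set (Option Int)) := by
      rw [PySem.Set.mem_ofList]; simp [hy]
    cases hS : (PySem.Set.ofList (a :: ys) : PySem.Set (Option Int)) with
    | nil => rw [hS] at ha
    | cons f rest =>
      cases rest with
      | nil =>
        rw [hS] at ha hyS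
        simp only [List.mem_singleton] at ha hyS
        exact absurd (hyS.trans ha.symm) hne
      | cons g gs => rfl

theorem pvLoopA_run (run : List (Int × Int × Option Int)) : ∀ (rest acc : List (Int × Int × Option Int)) (m t : Int)
    (f0 c : Option Int), (∀ p ∈ run, p.1 = m ∧ p.2.1 = t) →
    pvLoopA (run ++ rest) ((m, t, c) :: acc) (some ((m, t), f0)) =
      pvLoopA rest
        ((m, t, if run.all (fun p => pvNorm p.2.2 == f0) then c else none) :: acc)
        (some ((m, t), f0)) := by
  induction run with
  | nil => intro rest acc m t f0 c _; simp
  | cons p run' ih =>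
    intro rest acc m t f0 c h
    obtain ⟨mp, tp, fp⟩ := p
    obtain ⟨hm, ht⟩ := h _ (List.mem_cons_self)
    simp only at hm ht
    subst hm ht
    have hrec := fun c' => ih rest acc mp tp f0 c' (fun q hq => h q (List.mem_cons_of_mem _ hq))
    show (if ((mp, tp) : Int × Int) = (mp, tp) then
            if pvNorm fp ≠ f0 then
              pvLoopA (run' ++ rest) ((mp, tp, none) :: (((mp, tp, c) :: acc)).tail) (some ((mp, tp), f0))
            else pvLoopA (run' ++ rest) ((mp, tp, c) :: acc) (some ((mp, tp), f0))
          else pvLoopA (run' ++ rest) ((mp, tp, pvNorm fp) :: ((mp, tp, c) :: acc)) (some ((mp, tp), pvNorm fp))) = _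
    rw [if_pos rfl]
    by_cases hfp : pvNorm fp = f0
    · rw [if_neg (by simp [hfp]), hrec c]
      have hall : (((mp, tp, fp) :: run').all (fun p => pvNorm p.2.2 == f0))
          = (run'.all (fun p => pvNorm p.2.2 == f0)) := by
        simp [List.all_cons, hfp]
      rw [hall]
    · rw [if_pos hfp]
      simp only [List.tail_cons]
      rw [hrec none]
      have hall : (((mp, tp, fp) :: run').all (fun p => pvNorm p.2.2 == f0)) = false := by
        simp [List.all_cons, hfp]
      rw [hall]
      simp

theorem pvLoopA_eq_groups (l : List (Int × Int × Option Int)) :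
    ∀ (acc : List (Int × Int × Option Int)) (last : Option ((Int × Int) × Option Int)),
    (∀ k lf, last = some (k, lf) → ∀ p ∈ l.head?, (p.1, p.2.1) ≠ k) →
    pvLoopA l acc last = acc.reverse ++ (pvGroups l).map pvGroupOut := by
  induction l using pvGroups.induct with
  | case1 => intro acc last _; cases last with
    | none => simp [pvLoopA, pvGroups]
    | some kl => obtain ⟨k, lf⟩ := kl; simp [pvLoopA, pvGroups]
  | case2 p ps ih =>
    intro acc last hc
    obtain ⟨m, t, f⟩ := p
    set fi := pvNorm f with hfi
    set run := ps.takeWhile (pvSameKey (m, t, f)) with hrun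
    set rest := ps.dropWhile (pvSameKey (m, t, f)) with hrest
    have hps : ps = run ++ rest := (List.takeWhile_append_dropWhile).symm
    have hrunmem : ∀ q ∈ run, q.1 = m ∧ q.2.1 = t := by
      intro q hq
      have := List.mem_takeWhile_imp hq
      simpa [pvSameKey] using this
    have hstep : pvLoopA ((m, t, f) :: ps) acc last
        = pvLoopA ps ((m, t, fi) :: acc) (some ((m, t), fi)) := by
      cases last with
      | none => rfl
      | some kl =>
        obtain ⟨k, lf⟩ := kl
        have hk : ((m : Int), (t : Int)) ≠ k := by
          have := hc k lf rfl (m, t, f) (by simp)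
          simpa using this
        show (if ((m, t) : Int × Int) = k then _ else
              pvLoopA ps ((m, t, fi) :: acc) (some ((m, t), fi))) = _
        rw [if_neg hk]
    have hrest_head : ∀ k lf, (some (((m, t) : Int × Int), fi) : Option ((Int × Int) × Option Int)) = some (k, lf) →
        ∀ q ∈ rest.head?, (q.1, q.2.1) ≠ k := by
      rintro k lf hEq q hq
      obtain ⟨rfl, rfl⟩ : k = (m, t) ∧ lf = fi := by
        injection hEq with a; injection a with a1 a2; exact ⟨a1.symm, a2.symm⟩
      have hmem : rest.head? = some q := Option.mem_def.mp hq
      have hfind : ps.find? (fun x => !(pvSameKey (m, t, f) x)) = some q := by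
        rw [List.find?_not_eq_head?_dropWhile, ← hrest]; exact hmem
      have hfalse : pvSameKey (m, t, f) q = false := by
        simpa using List.find?_some hfind
      simp only [pvSameKey, decide_eq_false_iff_not, not_and] at hfalse
      intro hkq
      have h1 : q.1 = m := congrArg Prod.fst hkq
      have h2 : q.2.1 = t := congrArg Prod.snd hkq
      exact absurd h2 (hfalse h1)
    calc pvLoopA ((m, t, f) :: ps) acc last
        = pvLoopA (run ++ rest) ((m, t, fi) :: acc) (some ((m, t), fi)) := by rw [hstep, ← hps]
      _ = pvLoopA rest ((m, t, if run.all (fun p => pvNorm p.2.2 == fi) then fi else none) :: acc)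
            (some ((m, t), fi)) := pvLoopA_run run rest acc m t fi fi hrunmem
      _ = ((m, t, if run.all (fun p => pvNorm p.2.2 == fi) then fi else none) :: acc).reverse
            ++ (pvGroups rest).map pvGroupOut := ih _ _ hrest_head
      _ = acc.reverse ++ ((pvGroups ((m, t, f) :: ps)).map pvGroupOut) := by
          rw [pvGroups]
          simp only [List.map_cons, List.reverse_cons, List.append_assoc, List.singleton_append]
          congr 1
          rw [← hrun, ← hrest]
          congr 1
          show _ = pvGroupOut ((m, t, f) :: run)
          unfold pvGroupOut
          simp only [List.map_cons]
          rw [pvSet_single]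
          congr 1
          rw [List.all_map]
          rfl

-- ---- A-side: characterization of the grouped output on a key-sorted list ----

theorem pvKlt_of_kle_of_ne {a b : Int × Int} (h : pvKle a b) (hne : a ≠ b) : pvKlt a b := by
  obtain ⟨a1, a2⟩ := a
  obtain ⟨b1, b2⟩ := b
  unfold pvKle at h
  unfold pvKlt
  rw [Ne, Prod.mk.injEq] at hne
  simp only at h ⊢
  omega

theorem pvKlt_of_klt_of_kle {a b c : Int × Int} (h1 : pvKlt a b) (h2 : pvKle b c) : pvKlt a c := by
  obtain ⟨a1, a2⟩ := a
  obtain ⟨b1, b2⟩ := b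
  obtain ⟨c1, c2⟩ := c
  unfold pvKlt at h1 ⊢
  unfold pvKle at h2
  simp only at h1 h2 ⊢
  omega

theorem pvKlt_ne {a b : Int × Int} (h : pvKlt a b) : b ≠ a := by
  obtain ⟨a1, a2⟩ := a
  obtain ⟨b1, b2⟩ := b
  unfold pvKlt at h
  rw [Ne, Prod.mk.injEq]
  simp only at h
  omega

theorem pvGroups_key_mem (l : List (Int × Int × Option Int)) :
    ∀ x ∈ (pvGroups l).map pvGroupOut, pvKeyOf x ∈ l.map pvKeyOf := by
  induction l using pvGroups.induct with
  | case1 => simp [pvGroups]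
  | case2 p ps ih =>
    intro x hx
    rw [pvGroups] at hx
    rcases List.mem_cons.mp hx with rfl | hx'
    · obtain ⟨m, t, f⟩ := p
      unfold pvGroupOut
      simp [pvKeyOf]
    · have hkey := ih x hx'
      rcases List.mem_map.mp hkey with ⟨q, hq, hqe⟩
      have hqps : q ∈ ps := (List.dropWhile_sublist _).subset hq
      exact List.mem_map.mpr ⟨q, List.mem_cons_of_mem _ hqps, hqe⟩

theorem pvGroups_char (S : List (Int × Int × Option Int))
    (h : S.Pairwise (fun a b => pvKle (pvKeyOf a) (pvKeyOf b))) :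
    (∀ m t v, (m, t, v) ∈ (pvGroups S).map pvGroupOut ↔
        pvFlagsAt (m, t) S ≠ [] ∧ v = pvMeet0 (pvFlagsAt (m, t) S)) ∧
      ((pvGroups S).map pvGroupOut).Pairwise (fun a b => pvKlt (pvKeyOf a) (pvKeyOf b)) := by
  induction S using pvGroups.induct with
  | case1 =>
    constructor
    · intro m t v
      simp [pvGroups, pvFlagsAt]
    · simp [pvGroups]
  | case2 p ps ih =>
    obtain ⟨m0, t0, f0⟩ := p
    set run := ps.takeWhile (pvSameKey (m0, t0, f0)) with hrun
    set rest := ps.dropWhile (pvSameKey (m0, t0, f0)) with hrest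
    have hps : ps = run ++ rest := (List.takeWhile_append_dropWhile).symm
    have hrunkey : ∀ q ∈ run, pvKeyOf q = ((m0, t0) : Int × Int) := by
      intro q hq
      have := List.mem_takeWhile_imp hq
      simp only [pvSameKey, decide_eq_true_eq] at this
      simp [pvKeyOf, this.1, this.2]
    have hpair_ps : ps.Pairwise (fun a b => pvKle (pvKeyOf a) (pvKeyOf b)) :=
      (List.pairwise_cons.mp h).2
    have hpair_rest : rest.Pairwise (fun a b => pvKle (pvKeyOf a) (pvKeyOf b)) :=
      hpair_ps.sublist (List.dropWhile_sublist _)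
    have hle_ps : ∀ q ∈ ps, pvKle ((m0, t0) : Int × Int) (pvKeyOf q) := by
      intro q hq
      exact (List.pairwise_cons.mp h).1 q hq
    have hlt_rest : ∀ q ∈ rest, pvKlt ((m0, t0) : Int × Int) (pvKeyOf q) := by
      intro q hq
      cases hrestE : rest with
      | nil => rw [hrestE] at hq; cases hq
      | cons r rs =>
        have hfind : ps.find? (fun x => !(pvSameKey (m0, t0, f0) x)) = some r := by
          rw [List.find?_not_eq_head?_dropWhile, ← hrest, hrestE]; rfl
        have hrfalse : pvSameKey (m0, t0, f0) r = false := by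
          simpa using List.find?_some hfind
        have hrkey_ne : pvKeyOf r ≠ ((m0, t0) : Int × Int) := by
          simp only [pvSameKey, decide_eq_false_iff_not, not_and] at hrfalse
          intro hk
          have h1 : r.1 = m0 := congrArg Prod.fst hk
          have h2 : r.2.1 = t0 := congrArg Prod.snd hk
          exact absurd h2 (hrfalse h1)
        have hrmem_ps : r ∈ ps := by
          rw [hps, hrestE]; simp
        have hlt_r : pvKlt ((m0, t0) : Int × Int) (pvKeyOf r) :=
          pvKlt_of_kle_of_ne (hle_ps r hrmem_ps) (fun he => hrkey_ne he.symm)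
        rw [hrestE] at hq hpair_rest
        rcases List.mem_cons.mp hq with rfl | hq'
        · exact hlt_r
        · exact pvKlt_of_klt_of_kle hlt_r ((List.pairwise_cons.mp hpair_rest).1 q hq')
    have hgroups : pvGroups ((m0, t0, f0) :: ps) = ((m0, t0, f0) :: run) :: pvGroups rest := by
      rw [pvGroups]
    have hfilter_run : run.filter (fun p => decide (pvKeyOf p = ((m0, t0) : Int × Int))) = run :=
      List.filter_eq_self.mpr (fun q hq => by simp [hrunkey q hq])
    have hfilter_rest : rest.filter (fun p => decide (pvKeyOf p = ((m0, t0) : Int × Int))) = [] := by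
      rw [List.filter_eq_nil_iff]
      intro q hq
      simp only [decide_eq_true_eq]
      exact fun hk => (pvKlt_ne (hlt_rest q hq)) hk
    have hflag0 : pvFlagsAt (m0, t0) ((m0, t0, f0) :: ps)
        = pvNorm f0 :: run.map (fun p => pvNorm p.2.2) := by
      unfold pvFlagsAt
      rw [hps, List.filter_cons, List.filter_append, hfilter_run, hfilter_rest]
      simp [pvKeyOf]
    have hflagNe : ∀ k : Int × Int, k ≠ ((m0, t0) : Int × Int) →
        pvFlagsAt k ((m0, t0, f0) :: ps) = pvFlagsAt k rest := by
      intro k hk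
      unfold pvFlagsAt
      rw [hps, List.filter_cons, List.filter_append]
      have hhead : decide (pvKeyOf ((m0, t0, f0) : Int × Int × Option Int) = k) = false := by
        simp [pvKeyOf]
        exact fun he => hk he.symm
      have hrunnil : run.filter (fun p => decide (pvKeyOf p = k)) = [] := by
        rw [List.filter_eq_nil_iff]
        intro q hq
        simp only [decide_eq_true_eq]
        rw [hrunkey q hq]
        exact fun he => hk he.symm
      rw [hhead, hrunnil]
      simp
    have hout : pvGroupOut ((m0, t0, f0) :: run)
        = (m0, t0, pvMeet0 (pvNorm f0 :: run.map (fun p => pvNorm p.2.2))) := by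
      unfold pvGroupOut
      simp only [List.map_cons]
      rw [pvSet_single]
      rfl
    obtain ⟨ihmem, ihpw⟩ := ih hpair_rest
    constructor
    · intro m t v
      rw [hgroups, List.map_cons, hout]
      by_cases hk : ((m, t) : Int × Int) = ((m0, t0) : Int × Int)
      · have hm : m = m0 := congrArg Prod.fst hk
        have ht : t = t0 := congrArg Prod.snd hk
        subst hm ht
        rw [hflag0]
        simp only [List.mem_cons]
        constructor
        · rintro (heq | hmem)
          · refine ⟨List.cons_ne_nil _ _, ?_⟩
            exact congrArg (fun x => x.2.2) heq
          · exfalso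
            have hkeymem := pvGroups_key_mem rest (m, t, v) hmem
            rcases List.mem_map.mp hkeymem with ⟨q, hq, hqe⟩
            exact pvKlt_ne (hlt_rest q hq) (by rw [hqe]; rfl)
        · rintro ⟨-, rfl⟩
          exact Or.inl rfl
      · rw [hflagNe (m, t) hk, ← ihmem m t v]
        simp only [List.mem_cons]
        constructor
        · rintro (heq | hmem)
          · exfalso
            apply hk
            have h1 : m = m0 := congrArg Prod.fst heq
            have h2 : t = t0 := congrArg (fun x : Int × Int × Option Int => x.2.1) heq
            exact Prod.ext_iff.mpr ⟨h1, h2⟩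
          · exact hmem
        · intro hmem
          exact Or.inr hmem
    · rw [hgroups, List.map_cons]
      refine List.pairwise_cons.mpr ⟨?_, ihpw⟩
      intro x hx
      have hkeymem := pvGroups_key_mem rest x hx
      rcases List.mem_map.mp hkeymem with ⟨q, hq, hqe⟩
      have : pvKeyOf (pvGroupOut ((m0, t0, f0) :: run)) = ((m0, t0) : Int × Int) := by
        rw [hout]; rfl
      rw [this, ← hqe]
      exact hlt_rest q hq

-- ---- B-side: characterization of the dict fold ----

theorem pvComb_foldl_none (fs : List (Option Int)) : fs.foldl pvComb none = none := by
  induction fs with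
  | nil => rfl
  | cons f fs ih =>
    simp only [List.foldl_cons]
    have : pvComb none f = none := by unfold pvComb; split_ifs <;> rfl
    rw [this, ih]

theorem pvComb_foldl (fs : List (Option Int)) (f : Option Int) :
    fs.foldl pvComb f = if fs.all (· == f) then f else none := by
  induction fs with
  | nil => simp
  | cons g gs ih =>
    simp only [List.foldl_cons, List.all_cons, Bool.and_eq_true, beq_iff_eq]
    by_cases hg : g = f
    · subst hg
      have : pvComb g g = g := by simp [pvComb]
      rw [this, ih]
      simp
    · have hfg : f ≠ g := fun h => hg h.symm
      have : pvComb f g = none := by simp [pvComb, hfg]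
      rw [this, pvComb_foldl_none]
      simp [hg]

theorem pvGet_fold (l : List (Int × Int × Option Int)) :
    ∀ (d : PySem.Dict (Int × Int) (Option Int)) (k : Int × Int),
    (l.foldl pvStepB d).get? k =
      match d.get? k with
      | some v => some ((pvFlagsAt k l).foldl pvComb v)
      | none => match pvFlagsAt k l with
                | [] => none
                | f :: fs => some (fs.foldl pvComb f) := by
  induction l with
  | nil =>
    intro d k
    simp only [List.foldl_nil, pvFlagsAt, List.filter_nil, List.map_nil]
    cases d.get? k <;> rfl
  | cons p rest ih =>
    intro d k
    obtain ⟨m, t, f⟩ := p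
    by_cases hk : ((m, t) : Int × Int) = k
    · subst hk
      have hflag : pvFlagsAt (m, t) ((m, t, f) :: rest) = pvNorm f :: pvFlagsAt (m, t) rest := by
        simp [pvFlagsAt, pvKeyOf]
      rw [List.foldl_cons]
      cases hd : d.get? (m, t) with
      | none =>
        have hstep : pvStepB d (m, t, f) = d.insert (m, t) (pvNorm f) := by
          simp [pvStepB, hd]
        rw [hflag, hstep, ih, PySem.Dict.get?_insert_self]
      | some v =>
        have hstep2 : (pvStepB d (m, t, f)).get? (m, t) = some (pvComb v (pvNorm f)) := by
          by_cases hv : v = pvNorm f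
          · simp [pvStepB, hd, hv, pvComb]
          · simp [pvStepB, hd, hv, pvComb, PySem.Dict.get?_insert_self]
        rw [hflag, ih, hstep2]
        simp only [List.foldl_cons]
    · have hne : k ≠ (m, t) := fun h => hk h.symm
      have hstep : (pvStepB d (m, t, f)).get? k = d.get? k := by
        unfold pvStepB
        simp only
        cases hd : d.get? (m, t) with
        | none => exact PySem.Dict.get?_insert_of_ne _ _ hne
        | some v =>
          simp only
          split_ifs
          · exact PySem.Dict.get?_insert_of_ne _ _ hne
          · rfl
      have hflag : pvFlagsAt k ((m, t, f) :: rest) = pvFlagsAt k rest := by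
        simp [pvFlagsAt, pvKeyOf, hk]
      rw [hflag, List.foldl_cons, ih, hstep]

theorem pvNodupKeys_fold (l : List (Int × Int × Option Int))
    (d : PySem.Dict (Int × Int) (Option Int)) (h : d.keys.Nodup) :
    (l.foldl pvStepB d).keys.Nodup := by
  induction l generalizing d with
  | nil => exact h
  | cons p rest ih =>
    rw [List.foldl_cons]
    apply ih
    unfold pvStepB
    simp only
    cases d.get? (p.1, p.2.1) with
    | none => exact PySem.Dict.nodup_keys_insert _ _ _ h
    | some v =>
      simp only
      split_ifs
      · exact PySem.Dict.nodup_keys_insert _ _ _ h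
      · exact h

-- ---- perm invariance of the per-key merge ----

theorem pvMeet0_perm {l l' : List (Option Int)} (h : l.Perm l') : pvMeet0 l = pvMeet0 l' := by
  cases l with
  | nil => rw [List.nil_perm] at h; subst h; rfl
  | cons f fs =>
    cases l' with
    | nil => have := h.length_eq; simp at this
    | cons g gs =>
      show (if fs.all (· == f) then f else none) = (if gs.all (· == g) then g else none)
      have hmem := fun x => h.mem_iff (a := x)
      by_cases hall : ∀ x ∈ f :: fs, x = f
      · have hgf : g = f := hall g ((hmem g).mpr (by simp))
        have : ∀ x ∈ g :: gs, x = f := fun x hx => hall x ((hmem x).mpr hx)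
        rw [if_pos, if_pos, hgf]
        · simp only [List.all_eq_true, beq_iff_eq]
          intro x hx
          rw [this x (by simp [hx]), hgf]
        · simp only [List.all_eq_true, beq_iff_eq]
          intro x hx
          exact hall x (by simp [hx])
      · have hnot : ¬ ∀ x ∈ g :: gs, x = g := by
          intro hall'
          apply hall
          intro x hx
          have hf : f = g := (hall' f ((hmem f).mp (by simp)))
          rw [hall' x ((hmem x).mp hx), hf]
        rw [if_neg, if_neg]
        · simp only [List.all_eq_true, beq_iff_eq]
          intro hgs
          refine hnot ?_
          intro x hx
          rcases List.mem_cons.mp hx with rfl | hx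
          · rfl
          · exact hgs x hx
        · simp only [List.all_eq_true, beq_iff_eq]
          intro hfs
          refine hall ?_
          intro x hx
          rcases List.mem_cons.mp hx with rfl | hx
          · rfl
          · exact hfs x hx

theorem pvMeet0_none_or_mem (l : List (Option Int)) : pvMeet0 l = none ∨ pvMeet0 l ∈ l := by
  cases l with
  | nil => exact Or.inl rfl
  | cons f fs =>
    show (if fs.all (· == f) then f else none) = none ∨
      (if fs.all (· == f) then f else none) ∈ f :: fs
    split_ifs
    · exact Or.inr (by simp)
    · exact Or.inl rfl

-- ---- integer sort keys vs lexicographic key order, under Dom_'s bounds ----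

theorem pvDecodeA {p q : Int × Int × Option Int} (hp : pvBnd p) (hq : pvBnd q)
    (h : pvSortKey p ≤ pvSortKey q) : pvKle (pvKeyOf p) (pvKeyOf q) := by
  obtain ⟨m1, t1, f1⟩ := p
  obtain ⟨m2, t2, f2⟩ := q
  obtain ⟨hm1, ht1, hf1⟩ := hp
  obtain ⟨hm2, ht2, hf2⟩ := hq
  simp only at hm1 ht1 hf1 hm2 ht2 hf2
  have hv1 : -2147483648 ≤ (match f1 with | none => (0:Int) | some v => v) ∧
      (match f1 with | none => (0:Int) | some v => v) ≤ 2147483648 := by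
    cases f1 with
    | none => norm_num
    | some v => exact hf1 v rfl
  have hv2 : -2147483648 ≤ (match f2 with | none => (0:Int) | some v => v) ∧
      (match f2 with | none => (0:Int) | some v => v) ≤ 2147483648 := by
    cases f2 with
    | none => norm_num
    | some v => exact hf2 v rfl
  unfold pvSortKey at h
  simp only at h
  unfold pvKle pvKeyOf
  simp only
  set a := (match f1 with | none => (0:Int) | some v => v)
  set b := (match f2 with | none => (0:Int) | some v => v)
  have h' : m1 * 2 ^ 67 + t1 * 2 ^ 34 + a ≤ m2 * 2 ^ 67 + t2 * 2 ^ 34 + b := by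
    have e1 : (m1 * 2 ^ 33 + t1) * 2 ^ 34 + a = m1 * 2 ^ 67 + t1 * 2 ^ 34 + a := by ring
    have e2 : (m2 * 2 ^ 33 + t2) * 2 ^ 34 + b = m2 * 2 ^ 67 + t2 * 2 ^ 34 + b := by ring
    rw [e1, e2] at h
    exact h
  omega

theorem pvEncodeB {x y : Int × Int × Option Int} (hx : pvBnd x) (hy : pvBnd y)
    (h : pvKlt (pvKeyOf x) (pvKeyOf y)) :
    pvSortKeyB ((x.1, x.2.1), x.2.2) < pvSortKeyB ((y.1, y.2.1), y.2.2) := by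
  obtain ⟨m1, t1, f1⟩ := x
  obtain ⟨m2, t2, f2⟩ := y
  obtain ⟨hm1, ht1, hf1⟩ := hx
  obtain ⟨hm2, ht2, hf2⟩ := hy
  simp only at hm1 ht1 hf1 hm2 ht2 hf2
  have hv1 : -2147483648 ≤ (match f1 with | none => (0:Int) | some v => v) ∧
      (match f1 with | none => (0:Int) | some v => v) ≤ 2147483648 := by
    cases f1 with
    | none => norm_num
    | some v => exact hf1 v rfl
  have hv2 : -2147483648 ≤ (match f2 with | none => (0:Int) | some v => v) ∧
      (match f2 with | none => (0:Int) | some v => v) ≤ 2147483648 := by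
    cases f2 with
    | none => norm_num
    | some v => exact hf2 v rfl
  unfold pvKlt pvKeyOf at h
  simp only at h
  unfold pvSortKeyB
  simp only
  set a := (match f1 with | none => (0:Int) | some v => v)
  set b := (match f2 with | none => (0:Int) | some v => v)
  have e1 : (m1 * 2 ^ 33 + t1) * 2 ^ 34 + a = m1 * 2 ^ 67 + t1 * 2 ^ 34 + a := by ring
  have e2 : (m2 * 2 ^ 33 + t2) * 2 ^ 34 + b = m2 * 2 ^ 67 + t2 * 2 ^ 34 + b := by ring
  rw [e1, e2]
  omega

-- ===== VERDICT (by name: the statement is the Claim_ definition above) =====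
-- pvNorm never invents an integer: a some-result was already the input
theorem pvNorm_some {f : Option Int} {w : Int} (h : pvNorm f = some w) : f = some w := by
  by_cases hc : f = some (-1) ∨ f = some 2
  · rw [pvNorm, if_pos hc] at h
    cases h
  · rwa [pvNorm, if_neg hc] at h

theorem pvEmbed_unembed (l : List (Int × Int × Option Int)) :
    ((l.map (fun x => ((x.1, x.2.1), x.2.2))).map
        (fun q : (Int × Int) × Option Int => (q.1.1, q.1.2, q.2))) = l := by
  induction l with
  | nil => rfl
  | cons x xs ih =>
    obtain ⟨m, t, f⟩ := x
    simp [ih]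

-- ===== VERDICT (by name: the statement is the Claim_ definition above) =====
theorem dedup_and_sort_points_spec : Claim_equal_dedup_and_sort_points := by
  intro points hdom _hpre
  unfold Spec_dedup_and_sort_points dedup_and_sort_points dedup_and_sort_points_alt
  have hbnd : ∀ p ∈ points, pvBnd p := by
    intro p hp
    unfold Dom_dedup_and_sort_points at hdom
    rw [List.all_eq_true] at hdom
    have h := hdom p hp
    obtain ⟨m, t, f⟩ := p
    simp only [pvDomInt, Bool.and_eq_true, decide_eq_true_eq] at h
    refine ⟨h.1, h.2.1, ?_⟩
    intro v hv
    cases f with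
    | none => cases hv
    | some w =>
      obtain rfl : w = v := Option.some.inj hv
      simpa using h.2.2
  set S := PySem.List.sorted points pvSortKey with hSdef
  have hSmem : ∀ p ∈ S, p ∈ points := by
    intro p hp
    rw [hSdef, PySem.List.mem_sorted] at hp
    exact hp
  have hpairS : S.Pairwise (fun a b => pvKle (pvKeyOf a) (pvKeyOf b)) := by
    have h0 : S.Pairwise (fun a b => pvSortKey a ≤ pvSortKey b) := PySem.List.sorted_pairwise points pvSortKey
    exact List.Pairwise.imp_of_mem
      (fun ha hb hR => pvDecodeA (hbnd _ (hSmem _ ha)) (hbnd _ (hSmem _ hb)) hR) h0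
  obtain ⟨hmemA, hpwA⟩ := pvGroups_char S hpairS
  have hA : pvLoopA S [] none = (pvGroups S).map pvGroupOut := by
    simpa using pvLoopA_eq_groups S [] none (by simp)
  set merged := points.foldl pvStepB PySem.Dict.empty with hmdef
  show pvLoopA S [] none
      = (PySem.List.sorted merged.items pvSortKeyB).map (fun q => (q.1.1, q.1.2, q.2))
  rw [hA]
  have hnk : merged.keys.Nodup := pvNodupKeys_fold points _ PySem.Dict.nodup_keys_empty
  have hget : ∀ (k : Int × Int) (v : Option Int), merged.get? k = some v ↔
      (pvFlagsAt k points ≠ [] ∧ v = pvMeet0 (pvFlagsAt k points)) := by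
    intro k v
    rw [hmdef, pvGet_fold, PySem.Dict.get?_empty]
    cases hfk : pvFlagsAt k points with
    | nil => simp
    | cons f fs =>
      simp only
      rw [pvComb_foldl]
      constructor
      · intro hv
        refine ⟨List.cons_ne_nil _ _, ?_⟩
        show v = pvMeet0 (f :: fs)
        rw [show pvMeet0 (f :: fs) = if fs.all (· == f) then f else none from rfl]
        exact (Option.some.inj hv).symm
      · rintro ⟨-, rfl⟩
        rfl
  have hitems : ∀ q : (Int × Int) × Option Int, q ∈ merged.items ↔
      (pvFlagsAt q.1 points ≠ [] ∧ q.2 = pvMeet0 (pvFlagsAt q.1 points)) := by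
    intro q
    obtain ⟨k, v⟩ := q
    rw [← PySem.Dict.get?_eq_some_iff_mem_items merged k v hnk]
    exact hget k v
  have hfperm : ∀ k : Int × Int, (pvFlagsAt k S).Perm (pvFlagsAt k points) := by
    intro k
    have hp : S.Perm points := PySem.List.sorted_perm points pvSortKey false
    exact (hp.filter _).map _
  have htrans : ∀ (k : Int × Int) (v : Option Int),
      (pvFlagsAt k S ≠ [] ∧ v = pvMeet0 (pvFlagsAt k S)) ↔
        (pvFlagsAt k points ≠ [] ∧ v = pvMeet0 (pvFlagsAt k points)) := by
    intro k v
    have hp := hfperm k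
    constructor
    · rintro ⟨h1, rfl⟩
      refine ⟨?_, pvMeet0_perm hp⟩
      intro h0
      apply h1
      have := hp.length_eq
      rw [h0] at this
      exact List.length_eq_zero_iff.mp this
    · rintro ⟨h1, rfl⟩
      refine ⟨?_, (pvMeet0_perm hp).symm⟩
      intro h0
      apply h1
      have := hp.length_eq
      rw [h0] at this
      exact List.length_eq_zero_iff.mp this.symm
  set ys := ((pvGroups S).map pvGroupOut).map (fun x => ((x.1, x.2.1), x.2.2)) with hysdef
  have hysmem : ∀ q : (Int × Int) × Option Int, q ∈ ys ↔
      (pvFlagsAt q.1 points ≠ [] ∧ q.2 = pvMeet0 (pvFlagsAt q.1 points)) := by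
    intro q
    obtain ⟨⟨m, t⟩, v⟩ := q
    rw [hysdef]
    constructor
    · intro hq
      rcases List.mem_map.mp hq with ⟨x, hx, hxe⟩
      obtain ⟨xm, xt, xv⟩ := x
      have hm : xm = m := congrArg (fun z : (Int × Int) × Option Int => z.1.1) hxe
      have ht : xt = t := congrArg (fun z : (Int × Int) × Option Int => z.1.2) hxe
      have hv : xv = v := congrArg (fun z : (Int × Int) × Option Int => z.2) hxe
      rw [hm, ht, hv] at hx
      exact (htrans (m, t) v).mp ((hmemA m t v).mp hx)
    · intro hq
      have hx := (hmemA m t v).mpr ((htrans (m, t) v).mpr hq)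
      exact List.mem_map.mpr ⟨(m, t, v), hx, rfl⟩
  have hys_nodup : ys.Nodup := by
    have h1 : ((pvGroups S).map pvGroupOut).Pairwise (· ≠ ·) := by
      refine hpwA.imp ?_
      intro a b hlt heq
      exact pvKlt_ne hlt (congrArg pvKeyOf heq).symm
    refine List.Nodup.map ?_ h1
    intro x y hxy
    obtain ⟨xm, xt, xv⟩ := x
    obtain ⟨ym, yt, yv⟩ := y
    have hm : xm = ym := congrArg (fun z : (Int × Int) × Option Int => z.1.1) hxy
    have ht : xt = yt := congrArg (fun z : (Int × Int) × Option Int => z.1.2) hxy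
    have hv : xv = yv := congrArg (fun z : (Int × Int) × Option Int => z.2) hxy
    rw [hm, ht, hv]
  have hitems_nodup : merged.items.Nodup := by
    apply List.Nodup.of_map (f := Prod.fst)
    simpa [PySem.Dict.keys] using hnk
  have hperm : ys.Perm merged.items :=
    (List.perm_ext_iff_of_nodup hys_nodup hitems_nodup).mpr
      (fun q => by rw [hysmem q, hitems q])
  have hAoutBnd : ∀ x ∈ (pvGroups S).map pvGroupOut, pvBnd x := by
    intro x hx
    obtain ⟨m, t, v⟩ := x
    have hkeymem := pvGroups_key_mem S (m, t, v) hx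
    rcases List.mem_map.mp hkeymem with ⟨q, hq, hqe⟩
    have hqbnd := hbnd q (hSmem q hq)
    have hm : q.1 = m := congrArg Prod.fst hqe
    have ht : q.2.1 = t := congrArg Prod.snd hqe
    refine ⟨by rw [← hm]; exact hqbnd.1, by rw [← ht]; exact hqbnd.2.1, ?_⟩
    intro w hw
    have hv := ((hmemA m t v).mp hx).2
    rcases pvMeet0_none_or_mem (pvFlagsAt (m, t) S) with h0 | h0
    · rw [hv] at hw
      rw [h0] at hw
      cases hw
    · rw [← hv] at h0
      rcases List.mem_map.mp h0 with ⟨r, hr, hre⟩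
      have hrmem := List.mem_of_mem_filter hr
      have hrbnd := hbnd r (hSmem r hrmem)
      apply hrbnd.2.2
      apply pvNorm_some
      rw [hre]
      simpa using hw
  have hpwYs : ys.Pairwise (fun a b => pvSortKeyB a < pvSortKeyB b) := by
    rw [hysdef, List.pairwise_map]
    exact List.Pairwise.imp_of_mem
      (fun ha hb hR => pvEncodeB (hAoutBnd _ ha) (hAoutBnd _ hb) hR) hpwA
  rw [PySem.List.sorted_eq_of_perm_of_pairwise_lt merged.items ys pvSortKeyB hperm hpwYs, hysdef, pvEmbed_unembed]
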